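-- pv_equiv track=rewrite | github.com/ALLUPRASAD/Python_Data_Structures-Algorithms | Arrays/reccuring_fraction.py | fractionToDecimal
-- ===== SOURCE A (Python) =====
-- def fractionToDecimal(numerator, denominator):
--     s=""
--     t={}
--     rem=numerator%denominator
--     while rem!=0 and rem not in t:
--         t[rem]=len(s)
--         rem=rem*10
--         resul=rem//denominator
--         s=s+str(resul)
--         rem=rem%denominator
--     if rem==0:
--         return ''
--     else:
--         return s[t[rem]:]
-- ===== SOURCE B (Python) =====
-- def fractionToDecimal(numerator, denominator):
--     # Floyd cycle detection on the remainder sequence r -> r*10 % denominator: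
--     # O(1) extra state instead of a growing dict and string.
--     rem = numerator % denominator
--     # phase 1: tortoise/hare meet inside the cycle (they meet at 0 iff it terminates)
--     tort = rem * 10 % denominator
--     hare = tort * 10 % denominator
--     while tort != hare:
--         tort = tort * 10 % denominator
--         hare = hare * 10 % denominator * 10 % denominator
--     if tort == 0:
--         return ''
--     # phase 2: walk from the start and from the meeting point to the cycle start
--     tort = rem
--     while tort != hare:
--         tort = tort * 10 % denominator
--         hare = hare * 10 % denominator
--     # phase 3: emit digits until the remainder returns to the cycle start
--     start = tort
--     out = []
--     while True:
--         out.append(str(tort * 10 // denominator))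
--         tort = tort * 10 % denominator
--         if tort == start:
--             break
--     return ''.join(out)
-- ===== Notes on version B (the rewrite author's own statement) =====
-- stated objective: alternative
-- what changed: Replaced A's growing dict of seen remainders and incremental string concatenation by Floyd tortoise-and-hare cycle detection on the remainder recurrence r -> r*10 % denominator: find the tortoise/hare meeting point (which is 0 iff the expansion terminates), walk two pointers to the cycle start, then emit exactly the repeating digits into a list joined once, keeping O(1) state instead of an O(K)-entry dict and an incrementally rebuilt string.
import Mathlib
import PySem

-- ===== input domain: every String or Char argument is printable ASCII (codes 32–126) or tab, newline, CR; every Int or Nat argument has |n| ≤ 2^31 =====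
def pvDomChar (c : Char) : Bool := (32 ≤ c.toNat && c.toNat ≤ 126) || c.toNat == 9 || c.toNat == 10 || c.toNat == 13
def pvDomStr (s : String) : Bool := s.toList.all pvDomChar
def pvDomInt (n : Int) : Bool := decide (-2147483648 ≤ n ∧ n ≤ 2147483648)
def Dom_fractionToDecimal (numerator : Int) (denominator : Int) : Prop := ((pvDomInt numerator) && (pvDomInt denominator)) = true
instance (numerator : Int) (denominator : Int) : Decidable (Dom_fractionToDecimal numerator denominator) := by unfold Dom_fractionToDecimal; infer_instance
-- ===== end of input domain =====

-- B replaces A's growing dict of seen remainders by Floyd-style cycle detection on the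
-- remainder sequence (O(1) extra state); same return value wherever A returns.

-- ===== PORT A =====
-- while rem!=0 and rem not in t: t[rem]=len(s); rem*=10; s+=str(rem//den); rem%=den
-- fuel |den|+1 only makes the recursion total; it is proved sufficient below.
def fdLoopA (denominator : Int) : Nat → String → PySem.Dict Int Int → Int → String
  | 0, _, _, _ => ""
  | fuel+1, s, t, rem =>
    if rem ≠ 0 ∧ t.contains rem = false then
      let t' := t.insert rem (PySem.Str.len s)
      let rem1 := rem * 10
      let resul := PySem.Int.floordiv rem1 denominator
      let s' := s ++ PySem.Int.toStr resul
      fdLoopA denominator fuel s' t' (PySem.Int.mod rem1 denominator)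
    else
      if rem = 0 then "" else PySem.Str.slice s (some (t.getD rem 0)) none

def fractionToDecimal (numerator : Int) (denominator : Int) : String :=
  fdLoopA denominator (denominator.natAbs + 1) "" PySem.Dict.empty
    (PySem.Int.mod numerator denominator)

-- ===== PORT B =====
-- phase 1: while tort != hare: tort advances one step, hare two steps
-- (fuel |den|+1 only makes the recursion total; proved sufficient below)
def fdFloydLoop (denominator : Int) : Nat → Int → Int → Int
  | 0, tort, _ => tort
  | fuel+1, tort, hare =>
    if tort ≠ hare then
      fdFloydLoop denominator fuel (PySem.Int.mod (tort * 10) denominator)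
        (PySem.Int.mod (PySem.Int.mod (hare * 10) denominator * 10) denominator)
    else tort

-- phase 2: while tort != hare: both advance one step   (fuel |den|; proved sufficient)
def fdMeetLoop (denominator : Int) : Nat → Int → Int → Int
  | 0, tort, _ => tort
  | fuel+1, tort, hare =>
    if tort ≠ hare then
      fdMeetLoop denominator fuel (PySem.Int.mod (tort * 10) denominator)
        (PySem.Int.mod (hare * 10) denominator)
    else tort

-- phase 3: append a digit, advance, stop when back at start   (fuel |den|; sufficient)
def fdEmitLoop (denominator start : Int) : Nat → Int → List String → List String
  | 0, _, out => out
  | fuel+1, tort, out =>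
    if PySem.Int.mod (tort * 10) denominator = start then
      out ++ [PySem.Int.toStr (PySem.Int.floordiv (tort * 10) denominator)]
    else
      fdEmitLoop denominator start fuel (PySem.Int.mod (tort * 10) denominator)
        (out ++ [PySem.Int.toStr (PySem.Int.floordiv (tort * 10) denominator)])

def fractionToDecimal_alt (numerator : Int) (denominator : Int) : String :=
  let rem := PySem.Int.mod numerator denominator
  let tort0 := PySem.Int.mod (rem * 10) denominator
  let hare0 := PySem.Int.mod (tort0 * 10) denominator
  let meet := fdFloydLoop denominator (denominator.natAbs + 1) tort0 hare0
  if meet = 0 then ""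
  else
    let start := fdMeetLoop denominator denominator.natAbs rem meet
    PySem.Str.join "" (fdEmitLoop denominator start denominator.natAbs start [])

-- ===== PRECONDITION & SPEC =====
-- Python A raises ZeroDivisionError exactly when denominator = 0.
def Pre_fractionToDecimal (numerator : Int) (denominator : Int) : Prop := denominator ≠ 0
instance (numerator : Int) (denominator : Int) : Decidable (Pre_fractionToDecimal numerator denominator) := by unfold Pre_fractionToDecimal; infer_instance

def pvWitness_fractionToDecimal : Int × Int := (1, 7)

def Spec_fractionToDecimal (numerator : Int) (denominator : Int) (out : String) : Prop := out = fractionToDecimal_alt numerator denominator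
instance (numerator : Int) (denominator : Int) (out : String) : Decidable (Spec_fractionToDecimal numerator denominator out) := by unfold Spec_fractionToDecimal; infer_instance

-- ===== CLAIM (what is proved, stated in full; the proofs are below) =====
def Claim_equal_fractionToDecimal : Prop := ∀ (numerator : Int) (denominator : Int), Dom_fractionToDecimal numerator denominator → Pre_fractionToDecimal numerator denominator → Spec_fractionToDecimal numerator denominator (fractionToDecimal numerator denominator)

-- ===== LEMMAS AND PROOFS =====

-- the common digit/remainder recurrence r ↦ r*10 % d and its orbit
def fdF (d r : Int) : Int := PySem.Int.mod (r * 10) d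
def fdSeq (d r0 : Int) (k : Nat) : Int := (fdF d)^[k] r0

-- the state A's loop carries after k iterations: the digit string and the seen-dict
def fdSOf (d r0 : Int) : Nat → String
  | 0 => ""
  | k+1 => fdSOf d r0 k ++ PySem.Int.toStr (PySem.Int.floordiv (fdSeq d r0 k * 10) d)

def fdTOf (d r0 : Int) : Nat → PySem.Dict Int Int
  | 0 => PySem.Dict.empty
  | k+1 => (fdTOf d r0 k).insert (fdSeq d r0 k) (PySem.Str.len (fdSOf d r0 k))

-- A stops at the first index whose remainder is 0 or was seen before
def fdP (d r0 : Int) (k : Nat) : Prop :=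
  fdSeq d r0 k = 0 ∨ ∃ i < k, fdSeq d r0 i = fdSeq d r0 k

noncomputable def fdK (d r0 : Int) : Nat := sInf {k | fdP d r0 k}

def fdInRange (d r : Int) : Prop := (0 < d → 0 ≤ r ∧ r < d) ∧ (d < 0 → d < r ∧ r ≤ 0)

-- the character A appends for remainder index i
def fdC (d r0 : Int) (i : Nat) : Char :=
  Char.ofNat (48 + (PySem.Int.floordiv (fdSeq d r0 i * 10) d).toNat)

lemma fdSeq_succ (d r0 : Int) (k : Nat) :
    fdSeq d r0 (k+1) = fdF d (fdSeq d r0 k) := Function.iterate_succ_apply' _ _ _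

lemma fdSeq_add (d r0 : Int) (a b : Nat) :
    fdSeq d r0 (a + b) = (fdF d)^[b] (fdSeq d r0 a) := by
  unfold fdSeq; rw [Nat.add_comm]; exact Function.iterate_add_apply _ _ _ _

lemma fdF_zero (d : Int) : fdF d 0 = 0 := by simp [fdF, PySem.Int.mod]

lemma fdMod_inRange (d a : Int) (_hd : d ≠ 0) : fdInRange d (PySem.Int.mod a d) := by
  constructor
  · intro h; exact ⟨PySem.Int.mod_nonneg a h, PySem.Int.mod_lt a h⟩
  · intro h; exact PySem.Int.mod_neg_bounds a h

lemma fdSeq_inRange (d r0 : Int) (hd : d ≠ 0) (hr0 : fdInRange d r0) (k : Nat) :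
    fdInRange d (fdSeq d r0 k) := by
  cases k with
  | zero => exact hr0
  | succ k => rw [fdSeq_succ]; exact fdMod_inRange d _ hd

lemma fdDigit_bounds (d r : Int) (hd : d ≠ 0) (hr : fdInRange d r) :
    0 ≤ PySem.Int.floordiv (r * 10) d ∧ PySem.Int.floordiv (r * 10) d < 10 := by
  rcases lt_or_gt_of_ne hd with hneg | hpos
  · obtain ⟨h1, h2⟩ := hr.2 hneg
    rw [show r * 10 = -(-(r*10)) by ring, show d = -(-d) by ring,
      PySem.Int.floordiv_neg_neg, PySem.Int.floordiv_eq_ediv_of_pos (by omega)]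
    constructor
    · exact Int.ediv_nonneg (by omega) (by omega)
    · exact Int.ediv_lt_of_lt_mul (by omega) (by nlinarith)
  · obtain ⟨h1, h2⟩ := hr.1 hpos
    rw [PySem.Int.floordiv_eq_ediv_of_pos hpos]
    constructor
    · exact Int.ediv_nonneg (by omega) (by omega)
    · exact Int.ediv_lt_of_lt_mul hpos (by nlinarith)

lemma fdToStr_digit (v : Int) (h0 : 0 ≤ v) (h1 : v < 10) :
    (PySem.Int.toStr v).toList = [Char.ofNat (48 + v.toNat)] := by
  interval_cases v <;> decide

lemma fdSOf_toList (d r0 : Int) (hd : d ≠ 0) (hr0 : fdInRange d r0) (k : Nat) :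
    (fdSOf d r0 k).toList = (List.range k).map (fdC d r0) := by
  induction k with
  | zero => rfl
  | succ k ih =>
    have hb := fdDigit_bounds d (fdSeq d r0 k) hd (fdSeq_inRange d r0 hd hr0 k)
    simp only [fdSOf, String.toList_append, ih, List.range_succ, List.map_append,
      fdToStr_digit _ hb.1 hb.2, List.map_cons, List.map_nil, fdC]

lemma fdSOf_len (d r0 : Int) (hd : d ≠ 0) (hr0 : fdInRange d r0) (k : Nat) :
    PySem.Str.len (fdSOf d r0 k) = (k : Int) := by
  rw [PySem.Str.len_eq, fdSOf_toList d r0 hd hr0 k]; simp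

lemma fdTOf_get?_none (d r0 : Int) (k : Nat) (r : Int)
    (h : ∀ i < k, fdSeq d r0 i ≠ r) : (fdTOf d r0 k).get? r = none := by
  induction k with
  | zero => exact PySem.Dict.get?_empty r
  | succ k ih =>
    rw [fdTOf, PySem.Dict.get?_insert]
    rw [if_neg (fun he => h k (Nat.lt_succ_self k) he.symm)]
    exact ih (fun i hi => h i (Nat.lt_succ_of_lt hi))

lemma fdTOf_get?_isSome (d r0 : Int) (k : Nat) (r : Int)
    (h : ∃ i < k, fdSeq d r0 i = r) : ((fdTOf d r0 k).get? r).isSome = true := by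
  induction k with
  | zero => obtain ⟨i, hi, _⟩ := h; omega
  | succ k ih =>
    rw [fdTOf, PySem.Dict.get?_insert]
    by_cases hr : r = fdSeq d r0 k
    · rw [if_pos hr]; rfl
    · rw [if_neg hr]
      obtain ⟨i, hi, he⟩ := h
      have : i ≠ k := fun h' => hr (h' ▸ he).symm
      exact ih ⟨i, by omega, he⟩

lemma fdTOf_getD (d r0 : Int) (hd : d ≠ 0) (hr0 : fdInRange d r0)
    (k i0 : Nat) (r : Int) (hi0 : i0 < k) (he : fdSeq d r0 i0 = r)
    (hu : ∀ i < k, fdSeq d r0 i = r → i = i0) :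
    (fdTOf d r0 k).getD r 0 = (i0 : Int) := by
  induction k with
  | zero => omega
  | succ k ih =>
    rw [fdTOf, PySem.Dict.getD_insert]
    by_cases hr : r = fdSeq d r0 k
    · rw [if_pos hr]
      have : k = i0 := hu k (Nat.lt_succ_self k) hr.symm
      rw [fdSOf_len d r0 hd hr0, this]
    · rw [if_neg hr]
      have hi0' : i0 ≠ k := fun h' => hr (h' ▸ he).symm
      exact ih (by omega) (fun i hi hie => hu i (Nat.lt_succ_of_lt hi) hie)

-- pigeonhole: some remainder repeats within the first |d|+1 terms
lemma fdExists_repeat (d r0 : Int) (hd : d ≠ 0) (hr0 : fdInRange d r0) :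
    ∃ i j, i < j ∧ j ≤ d.natAbs ∧ fdSeq d r0 i = fdSeq d r0 j := by
  have key : ∃ x ∈ Finset.range (d.natAbs + 1), ∃ y ∈ Finset.range (d.natAbs + 1),
      x ≠ y ∧ fdSeq d r0 x = fdSeq d r0 y := by
    rcases lt_or_gt_of_ne hd with hneg | hpos
    · apply Finset.exists_ne_map_eq_of_card_lt_of_maps_to (t := Finset.Ioc d 0)
      · rw [Int.card_Ioc, Finset.card_range]
        omega
      · intro k hk
        have h := (fdSeq_inRange d r0 hd hr0 k).2 hneg
        simp only [Finset.coe_Ioc, Set.mem_Ioc]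
        omega
    · apply Finset.exists_ne_map_eq_of_card_lt_of_maps_to (t := Finset.Ico 0 d)
      · rw [Int.card_Ico, Finset.card_range]
        omega
      · intro k hk
        have h := (fdSeq_inRange d r0 hd hr0 k).1 hpos
        simp only [Finset.coe_Ico, Set.mem_Ico]
        omega
  obtain ⟨x, hx, y, hy, hne, he⟩ := key
  rw [Finset.mem_range] at hx hy
  rcases Nat.lt_or_ge x y with h | h
  · exact ⟨x, y, h, by omega, he⟩
  · exact ⟨y, x, by omega, by omega, he.symm⟩

lemma fdK_mem (d r0 : Int) (hd : d ≠ 0) (hr0 : fdInRange d r0) :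
    fdP d r0 (fdK d r0) := by
  obtain ⟨i, j, hij, _, he⟩ := fdExists_repeat d r0 hd hr0
  exact Nat.sInf_mem (⟨j, Or.inr ⟨i, hij, he⟩⟩ : {k | fdP d r0 k}.Nonempty)

lemma fdK_le (d r0 : Int) (hd : d ≠ 0) (hr0 : fdInRange d r0) :
    fdK d r0 ≤ d.natAbs := by
  obtain ⟨i, j, hij, hj, he⟩ := fdExists_repeat d r0 hd hr0
  exact le_trans (Nat.sInf_le (Or.inr ⟨i, hij, he⟩)) hj

lemma fdK_min (d r0 : Int) (k : Nat) (hk : k < fdK d r0) : ¬ fdP d r0 k := by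
  intro hm
  have h := Nat.sInf_le (s := {k | fdP d r0 k}) hm
  unfold fdK at hk
  omega

lemma fdSeq_ne_zero_of_lt_K (d r0 : Int) (k : Nat) (hk : k < fdK d r0) :
    fdSeq d r0 k ≠ 0 := fun h => fdK_min d r0 k hk (Or.inl h)

lemma fdDistinct (d r0 : Int) (i j : Nat) (hij : i < j) (hj : j < fdK d r0) :
    fdSeq d r0 i ≠ fdSeq d r0 j :=
  fun h => fdK_min d r0 j hj (Or.inr ⟨i, hij, h⟩)

lemma fdZero_absorb (d r0 : Int) (k : Nat) (h : fdSeq d r0 k = 0) :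
    ∀ m, fdSeq d r0 (k + m) = 0 := by
  intro m
  induction m with
  | zero => exact h
  | succ m ih => rw [show k + (m+1) = (k+m)+1 by omega, fdSeq_succ, ih, fdF_zero]

-- a coincidence seq (a+p) = seq a propagates to every later index
lemma fdShift (d r0 : Int) (a p : Nat) (h : fdSeq d r0 (a + p) = fdSeq d r0 a) :
    ∀ k, a ≤ k → fdSeq d r0 (k + p) = fdSeq d r0 k := by
  intro k hk
  obtain ⟨m, rfl⟩ := Nat.le.dest hk
  rw [show a + m + p = (a + p) + m by omega, fdSeq_add, h, ← fdSeq_add]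

lemma fdPeriod_mul (d r0 : Int) (μ lam : Nat)
    (hper : fdSeq d r0 (μ + lam) = fdSeq d r0 μ) :
    ∀ L k, μ ≤ k → fdSeq d r0 (k + L * lam) = fdSeq d r0 k := by
  intro L
  induction L with
  | zero => intro k _; simp
  | succ L ih =>
    intro k hk
    rw [show k + (L+1) * lam = (k + L * lam) + lam by ring]
    rw [fdShift d r0 μ lam hper _ (by omega), ih k hk]

lemma fdReduce (d r0 : Int) (μ lam : Nat) (hlam : 1 ≤ lam)
    (hper : fdSeq d r0 (μ + lam) = fdSeq d r0 μ) :
    ∀ k, μ ≤ k → fdSeq d r0 k = fdSeq d r0 (μ + (k - μ) % lam) := by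
  intro k
  induction k using Nat.strong_induction_on with
  | _ k ih =>
    intro hk
    by_cases hlt : k < μ + lam
    · rw [Nat.mod_eq_of_lt (by omega), show μ + (k - μ) = k by omega]
    · have h1 := fdShift d r0 μ lam hper (k - lam) (by omega)
      rw [Nat.sub_add_cancel (by omega)] at h1
      rw [h1, ih (k - lam) (by omega) (by omega)]
      have hmod : (k - lam - μ) % lam = (k - μ) % lam := by
        rw [show k - μ = (k - lam - μ) + lam by omega, Nat.add_mod_right]
      rw [hmod]

-- minimality of the cycle length seen from any point at or past the tail
-- a coincidence seq (a+p) = seq a forces the cycle length to divide p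
lemma fdLam_dvd (d r0 : Int) (μ lam a : Nat) (hlam : 1 ≤ lam)
    (hper : fdSeq d r0 (μ + lam) = fdSeq d r0 μ)
    (hdist : ∀ i j, i < j → j < μ + lam → fdSeq d r0 i ≠ fdSeq d r0 j) :
    ∀ p, 1 ≤ p → fdSeq d r0 (a + p) = fdSeq d r0 a → lam ∣ p := by
  intro p hp hsp
  by_cases hmod : p % lam = 0
  · exact Nat.dvd_of_mod_eq_zero hmod
  · exfalso
    set k0 := μ + a * lam with hk0
    have hk0n : a ≤ k0 := by
      have : a ≤ a * lam := Nat.le_mul_of_pos_right a (by omega)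
      omega
    have h1 : fdSeq d r0 (k0 + p) = fdSeq d r0 k0 :=
      fdShift d r0 a p hsp k0 hk0n
    have h2 : fdSeq d r0 k0 = fdSeq d r0 μ := fdPeriod_mul d r0 μ lam hper a μ (le_refl μ)
    have h3 : fdSeq d r0 (k0 + p) = fdSeq d r0 (μ + p % lam) := by
      rw [fdReduce d r0 μ lam hlam hper (k0 + p) (by omega)]
      congr 2
      rw [show k0 + p - μ = a * lam + p by omega]
      rw [show a * lam + p = p + a * lam by ring, Nat.add_mul_mod_self_right]
    have hfin : fdSeq d r0 μ = fdSeq d r0 (μ + p % lam) := by rw [← h2, ← h1, h3]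
    have hlt : p % lam < lam := Nat.mod_lt _ (by omega)
    exact hdist μ (μ + p % lam) (by omega) (by omega) hfin

-- phase 1 of B returns the remainder at the first tortoise/hare meeting index
lemma fdFloydLoop_eq (d r0 : Int) (M : Nat)
    (hM1 : 1 ≤ M) (hMeq : fdSeq d r0 M = fdSeq d r0 (2*M))
    (hMmin : ∀ c, 1 ≤ c → c < M → fdSeq d r0 c ≠ fdSeq d r0 (2*c)) :
    ∀ fuel c, 1 ≤ c → c ≤ M → M ≤ c + fuel →
      fdFloydLoop d fuel (fdSeq d r0 c) (fdSeq d r0 (2*c)) = fdSeq d r0 M := by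
  intro fuel
  induction fuel with
  | zero =>
    intro c h1 h2 h3
    have : c = M := by omega
    subst this
    rfl
  | succ fuel ih =>
    intro c h1 h2 h3
    by_cases hc : c = M
    · subst hc
      rw [fdFloydLoop, if_neg (by rw [hMeq]; simp)]
    · rw [fdFloydLoop, if_pos (hMmin c h1 (by omega))]
      have s1 : PySem.Int.mod (fdSeq d r0 c * 10) d = fdSeq d r0 (c+1) := by
        rw [fdSeq_succ]; rfl
      have s2 : PySem.Int.mod (PySem.Int.mod (fdSeq d r0 (2*c) * 10) d * 10) d
          = fdSeq d r0 (2*(c+1)) := by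
        rw [show 2*(c+1) = (2*c+1)+1 by ring, fdSeq_succ, fdSeq_succ]; rfl
      rw [s1, s2]
      exact ih (c+1) (by omega) (by omega) (by omega)

-- phase 2 of B returns the remainder at the start of the repeating block
lemma fdMeetLoop_eq (d r0 : Int) (μ lam : Nat)
    (hmeet : fdSeq d r0 (μ + lam) = fdSeq d r0 μ)
    (hmin : ∀ t, t < μ → fdSeq d r0 t ≠ fdSeq d r0 (t + lam)) :
    ∀ fuel c, c ≤ μ → μ ≤ c + fuel →
      fdMeetLoop d fuel (fdSeq d r0 c) (fdSeq d r0 (c + lam)) = fdSeq d r0 μ := by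
  intro fuel
  induction fuel with
  | zero =>
    intro c h1 h2
    have : c = μ := by omega
    subst this
    rfl
  | succ fuel ih =>
    intro c h1 h2
    by_cases hc : c = μ
    · subst hc
      rw [fdMeetLoop, if_neg (by rw [hmeet]; simp)]
    · have hcm : c < μ := by omega
      rw [fdMeetLoop, if_pos (hmin c hcm)]
      have s1 : PySem.Int.mod (fdSeq d r0 c * 10) d = fdSeq d r0 (c+1) := by
        rw [fdSeq_succ]; rfl
      have s2 : PySem.Int.mod (fdSeq d r0 (c + lam) * 10) d = fdSeq d r0 ((c+1) + lam) := by
        rw [show (c+1) + lam = (c + lam) + 1 by omega, fdSeq_succ]; rfl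
      rw [s1, s2]
      exact ih (c+1) (by omega) (by omega)

-- phase 3 of B emits exactly the lam digits of the repeating block
lemma fdEmitLoop_eq (d r0 : Int) (μ lam : Nat) (hlam : 1 ≤ lam)
    (hper : fdSeq d r0 (μ + lam) = fdSeq d r0 μ)
    (hdist : ∀ i j, i < j → j < μ + lam → fdSeq d r0 i ≠ fdSeq d r0 j) :
    ∀ fuel j acc, j < lam → lam ≤ j + fuel →
      fdEmitLoop d (fdSeq d r0 μ) fuel (fdSeq d r0 (μ + j))
        (acc ++ (List.range j).map
          (fun i => PySem.Int.toStr (PySem.Int.floordiv (fdSeq d r0 (μ + i) * 10) d)))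
      = acc ++ (List.range lam).map
          (fun i => PySem.Int.toStr (PySem.Int.floordiv (fdSeq d r0 (μ + i) * 10) d)) := by
  intro fuel
  induction fuel with
  | zero => intro j acc h1 h2; omega
  | succ fuel ih =>
    intro j acc h1 h2
    have htort : PySem.Int.mod (fdSeq d r0 (μ + j) * 10) d = fdSeq d r0 (μ + (j+1)) := by
      rw [show μ + (j+1) = (μ + j) + 1 by omega, fdSeq_succ]; rfl
    have hout : (acc ++ (List.range j).map
          (fun i => PySem.Int.toStr (PySem.Int.floordiv (fdSeq d r0 (μ + i) * 10) d)))
        ++ [PySem.Int.toStr (PySem.Int.floordiv (fdSeq d r0 (μ + j) * 10) d)]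
        = acc ++ (List.range (j+1)).map
          (fun i => PySem.Int.toStr (PySem.Int.floordiv (fdSeq d r0 (μ + i) * 10) d)) := by
      rw [List.range_succ, List.map_append, List.map_cons, List.map_nil, List.append_assoc]
    by_cases hj : j + 1 = lam
    · rw [fdEmitLoop, htort, if_pos (by rw [hj]; exact hper), hout, hj]
    · have hne : fdSeq d r0 (μ + (j+1)) ≠ fdSeq d r0 μ :=
        fun he => hdist μ (μ + (j+1)) (by omega) (by omega) he.symm
      rw [fdEmitLoop, htort, if_neg hne, hout]
      exact ih (j+1) acc (by omega) (by omega)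

-- A's loop, run from the state after k iterations, computes fdRes
noncomputable def fdRes (d r0 : Int) : String :=
  if fdSeq d r0 (fdK d r0) = 0 then ""
  else PySem.Str.slice (fdSOf d r0 (fdK d r0))
    (some ((fdTOf d r0 (fdK d r0)).getD (fdSeq d r0 (fdK d r0)) 0)) none

lemma fdLoopA_run (d r0 : Int) (hd : d ≠ 0) (hr0 : fdInRange d r0) :
    ∀ fuel k, k ≤ fdK d r0 → fdK d r0 < k + fuel →
    fdLoopA d fuel (fdSOf d r0 k) (fdTOf d r0 k) (fdSeq d r0 k) = fdRes d r0 := by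
  intro fuel
  induction fuel with
  | zero => intro k h1 h2; omega
  | succ fuel ih =>
    intro k h1 h2
    by_cases hk : k = fdK d r0
    · subst hk
      rw [fdLoopA]
      have hP := fdK_mem d r0 hd hr0
      by_cases hz : fdSeq d r0 (fdK d r0) = 0
      · rw [if_neg (by simp [hz]), if_pos hz, fdRes, if_pos hz]
      · have hrep : ∃ i < fdK d r0, fdSeq d r0 i = fdSeq d r0 (fdK d r0) :=
          hP.resolve_left hz
        have hsome := fdTOf_get?_isSome d r0 (fdK d r0) _ hrep
        have hcont : (fdTOf d r0 (fdK d r0)).contains (fdSeq d r0 (fdK d r0)) = true := by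
          rw [PySem.Dict.contains_eq_isSome_get?, hsome]
        rw [if_neg (by simp [hcont]), if_neg hz, fdRes, if_neg hz]
    · have hkK : k < fdK d r0 := by omega
      have hnz := fdSeq_ne_zero_of_lt_K d r0 k hkK
      have hnone : (fdTOf d r0 k).get? (fdSeq d r0 k) = none :=
        fdTOf_get?_none d r0 k _ (fun i hi => fdDistinct d r0 i k hi hkK)
      have hcont : (fdTOf d r0 k).contains (fdSeq d r0 k) = false := by
        rw [PySem.Dict.contains_eq_isSome_get?, hnone]; rfl
      rw [fdLoopA, if_pos ⟨hnz, hcont⟩]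
      have hrem : PySem.Int.mod (fdSeq d r0 k * 10) d = fdSeq d r0 (k+1) := by
        rw [fdSeq_succ]; rfl
      show fdLoopA d fuel (fdSOf d r0 (k+1)) (fdTOf d r0 (k+1))
        (PySem.Int.mod (fdSeq d r0 k * 10) d) = fdRes d r0
      rw [hrem]
      exact ih (k+1) (by omega) (by omega)

-- ===== VERDICT (by name: the statement is the Claim_ definition above) =====
theorem fractionToDecimal_spec : Claim_equal_fractionToDecimal := by
  intro numerator d _ hpre
  unfold Pre_fractionToDecimal at hpre
  unfold Spec_fractionToDecimal
  have hr0 : fdInRange d (PySem.Int.mod numerator d) := fdMod_inRange d numerator hpre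
  generalize hr0def : PySem.Int.mod numerator d = r0 at *
  have hKn : fdK d r0 ≤ d.natAbs := fdK_le d r0 hpre hr0
  have hnpos : 1 ≤ d.natAbs := by omega
  -- A computes fdRes
  have hA : fractionToDecimal numerator d = fdRes d r0 := by
    unfold fractionToDecimal
    rw [hr0def]
    exact fdLoopA_run d r0 hpre hr0 (d.natAbs + 1) 0 (by omega) (by omega)
  rw [hA]
  -- B side: phase-1 arguments are the first two orbit values
  have e1 : PySem.Int.mod (r0 * 10) d = fdSeq d r0 1 := by
    rw [show (1:Nat) = 0+1 from rfl, fdSeq_succ]; rfl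
  have e2 : PySem.Int.mod (fdSeq d r0 1 * 10) d = fdSeq d r0 2 := by
    rw [show (2:Nat) = 1+1 from rfl, fdSeq_succ]; rfl
  simp only [fractionToDecimal_alt, hr0def, e1, e2]
  by_cases hz : fdSeq d r0 (fdK d r0) = 0
  · -- terminating fraction: both sides are ""
    have habs : ∀ m, fdK d r0 ≤ m → fdSeq d r0 m = 0 := by
      intro m hm
      have := fdZero_absorb d r0 (fdK d r0) hz (m - fdK d r0)
      rwa [show fdK d r0 + (m - fdK d r0) = m by omega] at this
    have hW : (fdK d r0 + 1) ∈ {c | 1 ≤ c ∧ fdSeq d r0 c = fdSeq d r0 (2*c)} := by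
      refine ⟨by omega, ?_⟩
      rw [habs (fdK d r0 + 1) (by omega), habs (2*(fdK d r0 + 1)) (by omega)]
    set M := sInf {c | 1 ≤ c ∧ fdSeq d r0 c = fdSeq d r0 (2*c)} with hMdef
    have hMmem : 1 ≤ M ∧ fdSeq d r0 M = fdSeq d r0 (2*M) := Nat.sInf_mem ⟨_, hW⟩
    have hMle : M ≤ fdK d r0 + 1 := Nat.sInf_le hW
    have hMmin : ∀ c, 1 ≤ c → c < M → fdSeq d r0 c ≠ fdSeq d r0 (2*c) := by
      intro c h1 h2 he
      have := Nat.sInf_le (s := {c | 1 ≤ c ∧ fdSeq d r0 c = fdSeq d r0 (2*c)}) ⟨h1, he⟩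
      omega
    have hM0 : fdSeq d r0 M = 0 := by
      by_contra hne
      have hMK : M < fdK d r0 := by
        by_contra hge
        exact hne (habs M (by omega))
      have h2MK : 2*M < fdK d r0 := by
        by_contra hge
        exact hne (hMmem.2.trans (habs (2*M) (by omega)))
      exact fdDistinct d r0 M (2*M) (by omega) h2MK hMmem.2
    have hfloyd : fdFloydLoop d (d.natAbs + 1) (fdSeq d r0 1) (fdSeq d r0 2) = fdSeq d r0 M := by
      have := fdFloydLoop_eq d r0 M hMmem.1 hMmem.2 hMmin (d.natAbs + 1) 1
        (by omega) (by omega) (by omega)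
      simpa using this
    rw [hfloyd, if_pos hM0, fdRes, if_pos hz]
  · -- repeating case
    have hrep : ∃ i < fdK d r0, fdSeq d r0 i = fdSeq d r0 (fdK d r0) :=
      (fdK_mem d r0 hpre hr0).resolve_left hz
    have hrep' : {i | i < fdK d r0 ∧ fdSeq d r0 i = fdSeq d r0 (fdK d r0)}.Nonempty := by
      obtain ⟨i, hi, he⟩ := hrep; exact ⟨i, hi, he⟩
    set μ := sInf {i | i < fdK d r0 ∧ fdSeq d r0 i = fdSeq d r0 (fdK d r0)} with hμdef
    have hμmem : μ < fdK d r0 ∧ fdSeq d r0 μ = fdSeq d r0 (fdK d r0) := Nat.sInf_mem hrep'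
    set lam := fdK d r0 - μ with hlamdef
    have hlam : 1 ≤ lam := by omega
    have hKeq : fdK d r0 = μ + lam := by omega
    have hper : fdSeq d r0 (μ + lam) = fdSeq d r0 μ := by rw [← hKeq]; exact hμmem.2.symm
    have hdist : ∀ i j, i < j → j < μ + lam → fdSeq d r0 i ≠ fdSeq d r0 j := by
      rw [← hKeq]; exact fun i j hij hj => fdDistinct d r0 i j hij hj
    have huniq : ∀ i < fdK d r0, fdSeq d r0 i = fdSeq d r0 (fdK d r0) → i = μ := by
      intro i hi hie
      by_contra hne
      rcases Nat.lt_or_ge i μ with h | h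
      · have := Nat.sInf_le (s := {i | i < fdK d r0 ∧ fdSeq d r0 i = fdSeq d r0 (fdK d r0)})
          ⟨hi, hie⟩
        omega
      · exact fdDistinct d r0 μ i (by omega) hi (hμmem.2.trans hie.symm)
    have hnz_all : ∀ k, fdSeq d r0 k ≠ 0 := by
      intro k
      rcases Nat.lt_or_ge k (fdK d r0) with h | h
      · exact fdSeq_ne_zero_of_lt_K d r0 k h
      · rw [fdReduce d r0 μ lam hlam hper k (by omega)]
        apply fdSeq_ne_zero_of_lt_K
        have := Nat.mod_lt (k - μ) (y := lam) (by omega)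
        omega
    -- the first tortoise/hare meeting index M
    have hdm : lam * (μ / lam) + μ % lam = μ := Nat.div_add_mod μ lam
    have hmodlt : μ % lam < lam := Nat.mod_lt _ (by omega)
    have hexp : lam * (μ / lam + 1) = lam * (μ / lam) + lam := by ring
    have hW : lam * (μ / lam + 1) ∈ {c | 1 ≤ c ∧ fdSeq d r0 c = fdSeq d r0 (2*c)} := by
      refine ⟨by omega, ?_⟩
      have hm0μ : μ ≤ lam * (μ / lam + 1) := by omega
      have := fdPeriod_mul d r0 μ lam hper (μ / lam + 1) (lam * (μ / lam + 1)) hm0μ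
      rw [show lam * (μ / lam + 1) + (μ / lam + 1) * lam = 2 * (lam * (μ / lam + 1)) by ring]
        at this
      exact this.symm
    set M := sInf {c | 1 ≤ c ∧ fdSeq d r0 c = fdSeq d r0 (2*c)} with hMdef
    have hMmem : 1 ≤ M ∧ fdSeq d r0 M = fdSeq d r0 (2*M) := Nat.sInf_mem ⟨_, hW⟩
    have hMle : M ≤ μ + lam := by
      have h1 := Nat.sInf_le hW
      omega
    have hMmin : ∀ c, 1 ≤ c → c < M → fdSeq d r0 c ≠ fdSeq d r0 (2*c) := by
      intro c h1 h2 he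
      have := Nat.sInf_le (s := {c | 1 ≤ c ∧ fdSeq d r0 c = fdSeq d r0 (2*c)}) ⟨h1, he⟩
      omega
    have hfloyd : fdFloydLoop d (d.natAbs + 1) (fdSeq d r0 1) (fdSeq d r0 2) = fdSeq d r0 M := by
      have := fdFloydLoop_eq d r0 M hMmem.1 hMmem.2 hMmin (d.natAbs + 1) 1
        (by omega) (by omega) (by omega)
      simpa using this
    rw [hfloyd, if_neg (hnz_all M)]
    -- the cycle length divides M, so the meeting point has the tail period M
    have hdvd : lam ∣ M := by
      apply fdLam_dvd d r0 μ lam M hlam hper hdist M hMmem.1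
      rw [show M + M = 2*M by ring]
      exact hMmem.2.symm
    have hmeet2 : fdSeq d r0 (μ + M) = fdSeq d r0 μ := by
      obtain ⟨L, hL⟩ := hdvd
      have := fdPeriod_mul d r0 μ lam hper L μ (le_refl μ)
      rwa [show L * lam = lam * L by ring, ← hL] at this
    have hmin2 : ∀ t, t < μ → fdSeq d r0 t ≠ fdSeq d r0 (t + M) := by
      intro t ht heq
      rcases Nat.lt_or_ge (t + M) (μ + lam) with h | h
      · exact hdist t (t + M) (by omega) h heq
      · have hred := fdReduce d r0 μ lam hlam hper (t + M) (by omega)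
        have hidx : μ + (t + M - μ) % lam < μ + lam := by
          have := Nat.mod_lt (t + M - μ) (y := lam) (by omega)
          omega
        exact hdist t (μ + (t + M - μ) % lam) (by omega) hidx (heq.trans hred)
    have hmeetloop : fdMeetLoop d d.natAbs r0 (fdSeq d r0 M) = fdSeq d r0 μ := by
      have := fdMeetLoop_eq d r0 μ M hmeet2 hmin2 d.natAbs 0 (by omega) (by omega)
      simpa using this
    rw [hmeetloop]
    -- the emit loop produces the lam digits of the block
    have hemit : fdEmitLoop d (fdSeq d r0 μ) d.natAbs (fdSeq d r0 μ) []
        = (List.range lam).map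
          (fun i => PySem.Int.toStr (PySem.Int.floordiv (fdSeq d r0 (μ + i) * 10) d)) := by
      have := fdEmitLoop_eq d r0 μ lam hlam hper hdist d.natAbs 0 [] (by omega) (by omega)
      simpa using this
    rw [hemit, fdRes, if_neg hz]
    -- both sides are strings: compare their character lists
    apply String.toList_inj.mp
    have hgetD : (fdTOf d r0 (fdK d r0)).getD (fdSeq d r0 (fdK d r0)) 0 = (μ : Int) :=
      fdTOf_getD d r0 hpre hr0 (fdK d r0) μ _ hμmem.1 hμmem.2 huniq
    -- the A side list
    have hAlist : (PySem.Str.slice (fdSOf d r0 (fdK d r0))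
        (some ((fdTOf d r0 (fdK d r0)).getD (fdSeq d r0 (fdK d r0)) 0)) none).toList
        = (List.range lam).map (fun j => fdC d r0 (μ + j)) := by
      rw [hgetD]
      have hsl : (PySem.Str.slice (fdSOf d r0 (fdK d r0)) (some ((μ : Nat) : Int)) none).toList
          = ((fdSOf d r0 (fdK d r0)).toList).drop μ := by
        simp [PySem.Str.slice, PySem.List.slice_from_natCast]
      rw [hsl, fdSOf_toList d r0 hpre hr0, hKeq, List.range_add, List.map_append]
      have hlen : ((List.range μ).map (fdC d r0)).length = μ := by simp
      rw [List.drop_left' hlen, List.map_map]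
      rfl
    -- the B side list
    have hBlist : (PySem.Str.join "" ((List.range lam).map
        (fun j => PySem.Int.toStr (PySem.Int.floordiv (fdSeq d r0 (μ + j) * 10) d)))).toList
        = (List.range lam).map (fun j => fdC d r0 (μ + j)) := by
      simp only [PySem.Str.join]
      have hmap : ((List.range lam).map
          (fun j => PySem.Int.toStr (PySem.Int.floordiv (fdSeq d r0 (μ + j) * 10) d))).map
            String.toList
          = ((List.range lam).map (fun j => fdC d r0 (μ + j))).map (fun c => [c]) := by
        simp only [List.map_map]
        apply List.map_congr_left
        intro j _
        have hb := fdDigit_bounds d (fdSeq d r0 (μ + j)) hpre (fdSeq_inRange d r0 hpre hr0 (μ + j))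
        simp only [Function.comp_apply, fdToStr_digit _ hb.1 hb.2, fdC]
      rw [hmap, show ("" : String).toList = ([] : List Char) from rfl,
        PySem.Chars.join_nil_singletons]
      simp
    rw [hAlist, hBlist]
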